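-- pv_equiv track=rewrite | github.com/jhondrl6/ia-hotels-agent | modules/auditors/ai_crawler_auditor.py | _check_crawler_allowed
-- ===== SOURCE A (Python) =====
-- from typing import Dict, List, Optional
--
-- def _check_crawler_allowed(robots_content: Optional[str], user_agent: str) -> bool:
--     """Check if a specific crawler is allowed based on robots.txt.
--
--     Args:
--         robots_content: Content of robots.txt file.
--         user_agent: User agent string to check.
--
--     Returns:
--         True if allowed, False if blocked, True if no robots.txt.
--     """
--     if not robots_content:
--         return True
--
--     lines = robots_content.split('\n')
--
--     user_agent_lines = []
--     in_user_agent_block = False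
--     matched_specific = False
--
--     for line in lines:
--         line = line.strip()
--         if not line or line.startswith('#'):
--             continue
--
--         if line.lower().startswith('user-agent:'):
--             ua = line.split(':', 1)[1].strip()
--             if ua == user_agent:
--                 in_user_agent_block = True
--                 matched_specific = True
--                 user_agent_lines = []
--             elif ua == '*':
--                 if not matched_specific:
--                     in_user_agent_block = True
--                     user_agent_lines = []
--                 else:
--                     in_user_agent_block = False
--             else:
--                 in_user_agent_block = False
--                 if matched_specific:
--                     break
--         elif in_user_agent_block:
--             if line.lower().startswith('disallow:'):
--                 path = line.split(':', 1)[1].strip()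
--                 if path:
--                     return False
--             elif line.lower().startswith('allow:'):
--                 pass
--
--     return True
-- ===== SOURCE B (Python) =====
-- from typing import Optional
--
--
-- def _parse_records(lines):
--     """Group robots.txt lines into (user-agent, stripped directive lines) records."""
--     records = []
--     i = 0
--     n = len(lines)
--     while i < n:
--         line = lines[i].strip()
--         i += 1
--         if not line or line.startswith('#') or not line.lower().startswith('user-agent:'):
--             continue
--         ua = line.split(':', 1)[1].strip()
--         dirs = []
--         while i < n:
--             nxt = lines[i].strip()
--             if not nxt or nxt.startswith('#'):
--                 i += 1
--                 continue
--             if nxt.lower().startswith('user-agent:'):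
--                 break
--             dirs.append(nxt)
--             i += 1
--         records.append((ua, dirs))
--     return records
--
--
-- def _check_crawler_allowed(robots_content: Optional[str], user_agent: str) -> bool:
--     if not robots_content:
--         return True
--     records = _parse_records(robots_content.split('\n'))
--     matched_specific = False
--     for ua, directives in records:
--         if ua == user_agent:
--             matched_specific = True
--         elif ua == '*':
--             if matched_specific:
--                 continue
--         else:
--             if matched_specific:
--                 break
--             continue
--         if any(d.lower().startswith('disallow:') and d.split(':', 1)[1].strip()
--                for d in directives):
--             return False
--     return True
-- ===== Notes on version B (the rewrite author's own statement) =====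
-- stated objective: alternative
-- what changed: A interleaves user-agent-block tracking and directive checking in one stateful line loop; B first groups the lines into (user-agent, directives) records and then evaluates the records with a matched_specific scan that breaks on the first foreign header after a specific match.
import Mathlib
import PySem

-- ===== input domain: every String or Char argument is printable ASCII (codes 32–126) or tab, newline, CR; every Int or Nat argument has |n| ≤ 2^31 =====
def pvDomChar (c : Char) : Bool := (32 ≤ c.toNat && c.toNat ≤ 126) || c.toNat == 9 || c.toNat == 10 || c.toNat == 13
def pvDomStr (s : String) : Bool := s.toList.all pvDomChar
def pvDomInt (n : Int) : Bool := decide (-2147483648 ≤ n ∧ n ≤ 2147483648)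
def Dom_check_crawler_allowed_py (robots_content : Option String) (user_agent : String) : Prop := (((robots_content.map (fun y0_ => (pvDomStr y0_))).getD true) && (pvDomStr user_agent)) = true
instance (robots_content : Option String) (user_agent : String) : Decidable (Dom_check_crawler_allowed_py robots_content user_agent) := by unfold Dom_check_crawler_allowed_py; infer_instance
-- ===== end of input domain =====

-- B groups lines into (user-agent, directives) records first, then evaluates the records; same return value as A.

-- shared line predicates (both Pythons evaluate these identical sub-expressions)
def pvIsSkip (line : String) : Bool := line == "" || PySem.Str.startswith line "#"
def pvIsHeader (line : String) : Bool := PySem.Str.startswith (PySem.Str.lower line) "user-agent:"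
def pvIsDisallow (line : String) : Bool := PySem.Str.startswith (PySem.Str.lower line) "disallow:"
-- line.split(':', 1)[1].strip(); the [1] index is only reached on lines that contain ':' (startswith guarantees it), so getD is never the value
def pvAfterColon (line : String) : String :=
  PySem.Str.strip ((PySem.List.pyGet? ((PySem.Str.splitMax? line ":" 1).getD []) 1).getD "")

-- ===== PORT A =====
def pvALoop (user_agent : String) : List String → Bool → Bool → Bool
  | [], _, _ => true
  | raw :: rest, in_block, matched =>
    let line := PySem.Str.strip raw
    if pvIsSkip line then pvALoop user_agent rest in_block matched
    else if pvIsHeader line then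
      let ua := pvAfterColon line
      if ua == user_agent then pvALoop user_agent rest true true
      else if ua == "*" then
        if !matched then pvALoop user_agent rest true matched
        else pvALoop user_agent rest false matched
      else
        if matched then true else pvALoop user_agent rest false matched
    else if in_block then
      if pvIsDisallow line then
        if pvAfterColon line != "" then false else pvALoop user_agent rest in_block matched
      else pvALoop user_agent rest in_block matched  -- the 'allow:' branch is a pass
    else pvALoop user_agent rest in_block matched

def check_crawler_allowed_py (robots_content : Option String) (user_agent : String) : Bool :=
  match robots_content with
  | none => true
  | some s => if s == "" then true else pvALoop user_agent (((PySem.Str.split? s "\n").getD [])) false false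

-- ===== PORT B =====
-- inner while loop of _parse_records: collect stripped directive lines up to the next header
def pvTake : List String → List String × List String
  | [] => ([], [])
  | raw :: rest =>
    let line := PySem.Str.strip raw
    if pvIsSkip line then pvTake rest
    else if pvIsHeader line then ([], raw :: rest)
    else (line :: (pvTake rest).1, (pvTake rest).2)

theorem pvTake_len (ls : List String) : (pvTake ls).2.length ≤ ls.length := by
  induction ls with
  | nil => simp [pvTake]
  | cons raw rest ih => simp only [pvTake]; split_ifs <;> simp <;> omega

-- outer while loop of _parse_records
def pvGroup : List String → List (String × List String)
  | [] => []
  | raw :: rest =>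
    let line := PySem.Str.strip raw
    if pvIsSkip line || !pvIsHeader line then pvGroup rest
    else (pvAfterColon line, (pvTake rest).1) :: pvGroup (pvTake rest).2
  termination_by ls => ls.length
  decreasing_by
  · simp
  · have := pvTake_len rest; simp; omega

def pvHasDisallow (dirs : List String) : Bool :=
  dirs.any (fun d => pvIsDisallow d && pvAfterColon d != "")

def pvEval (user_agent : String) : List (String × List String) → Bool → Bool
  | [], _ => true
  | (ua, dirs) :: recs, matched =>
    if ua == user_agent then
      if pvHasDisallow dirs then false else pvEval user_agent recs true
    else if ua == "*" then
      if matched then pvEval user_agent recs matched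
      else if pvHasDisallow dirs then false else pvEval user_agent recs matched
    else
      if matched then true else pvEval user_agent recs matched

def check_crawler_allowed_py_alt (robots_content : Option String) (user_agent : String) : Bool :=
  match robots_content with
  | none => true
  | some s => if s == "" then true else pvEval user_agent (pvGroup (((PySem.Str.split? s "\n").getD []))) false

-- ===== PRECONDITION & SPEC =====
def Spec_check_crawler_allowed_py (robots_content : Option String) (user_agent : String) (out : Bool) : Prop := out = check_crawler_allowed_py_alt robots_content user_agent
instance (robots_content : Option String) (user_agent : String) (out : Bool) : Decidable (Spec_check_crawler_allowed_py robots_content user_agent out) := by unfold Spec_check_crawler_allowed_py; infer_instance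

-- ===== CLAIM (what is proved, stated in full; the proofs are below) =====
def Claim_equal_check_crawler_allowed_py : Prop := ∀ (robots_content : Option String) (user_agent : String), Dom_check_crawler_allowed_py robots_content user_agent → Spec_check_crawler_allowed_py robots_content user_agent (check_crawler_allowed_py robots_content user_agent)

-- ===== LEMMAS AND PROOFS =====

theorem pvGroup_pvTake (ls : List String) : pvGroup (pvTake ls).2 = pvGroup ls := by
  induction ls with
  | nil => simp [pvTake]
  | cons raw rest ih =>
    simp only [pvTake, pvGroup]
    split_ifs with h1 h2 <;> simp_all [pvGroup]

theorem pvSkip_not_header (line : String) (h : pvIsSkip line = true) : pvIsHeader line = false := by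
  simp only [pvIsSkip, Bool.or_eq_true, beq_iff_eq] at h
  simp only [pvIsHeader]
  rcases h with h | h
  · subst h; decide
  · rw [Bool.eq_false_iff]
    intro hh
    have h1 := (PySem.Chars.startswith_iff _ _).1 (by simpa using h)
    have h2 := (PySem.Chars.startswith_iff _ _).1 (by simpa using hh)
    obtain ⟨t, ht⟩ := h1
    obtain ⟨u, hu⟩ := h2
    rw [← ht] at hu
    simp [PySem.Chars.lower, PySem.Chars.lowerChar] at hu
    exact absurd hu.1 (by decide)

theorem pvKey (user_agent : String) (ls : List String) : ∀ (in_block matched : Bool),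
    pvALoop user_agent ls in_block matched =
      (if in_block && pvHasDisallow (pvTake ls).1 then false
       else pvEval user_agent (pvGroup ls) matched) := by
  induction ls with
  | nil => intro ib m; simp [pvALoop, pvTake, pvHasDisallow, pvGroup, pvEval]
  | cons raw rest ih =>
    intro ib m
    by_cases hs : pvIsSkip (PySem.Str.strip raw)
    · simp [pvALoop, pvGroup, pvTake, hs, pvSkip_not_header _ hs, ih]
    · by_cases hh : pvIsHeader (PySem.Str.strip raw)
      · by_cases h1 : pvAfterColon (PySem.Str.strip raw) == user_agent
        · simp [pvALoop, pvGroup, pvTake, hs, hh, h1, pvEval, pvHasDisallow, ih, pvGroup_pvTake]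
        · by_cases h2 : pvAfterColon (PySem.Str.strip raw) == "*"
          · cases m <;>
              simp [pvALoop, pvGroup, pvTake, hs, hh, h1, h2, pvEval, pvHasDisallow, ih, pvGroup_pvTake]
          · cases m <;>
              simp [pvALoop, pvGroup, pvTake, hs, hh, h1, h2, pvEval, pvHasDisallow, ih, pvGroup_pvTake]
      · by_cases hd : pvIsDisallow (PySem.Str.strip raw)
        · by_cases hp : pvAfterColon (PySem.Str.strip raw) == ""
          · cases ib <;> simp [pvALoop, pvGroup, pvTake, hs, hh, hd, pvHasDisallow, ih, Bool.and_assoc]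
          · cases ib <;> simp [pvALoop, pvGroup, pvTake, hs, hh, hd, pvHasDisallow, ih, Bool.and_assoc]
        · cases ib <;> simp [pvALoop, pvGroup, pvTake, hs, hh, hd, pvHasDisallow, ih]

-- ===== VERDICT (by name: the statement is the Claim_ definition above) =====
theorem check_crawler_allowed_py_spec : Claim_equal_check_crawler_allowed_py := by
  intro rc ua _
  unfold Spec_check_crawler_allowed_py check_crawler_allowed_py check_crawler_allowed_py_alt
  cases rc with
  | none => rfl
  | some s =>
    by_cases h : s == "" <;> simp [h, pvKey]
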